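-- pv_equiv track=rewrite | github.com/solomondg/spice-crypt | spice_crypt/_des_base.py | _build_permutation_lut
-- ===== SOURCE A (Python) =====
-- def _build_permutation_lut(table):
--     """
--     Precompute a byte-chunked lookup table for a bit permutation.
--
--     Given a permutation table of length N, this builds a list of
--     (byte_count) 256-entry sub-tables.  To apply the permutation,
--     split the input into 8-bit chunks and OR together the looked-up
--     contributions::
--
--         result = 0
--         for byte_idx, sub in enumerate(lut):
--             result |= sub[(value >> (byte_idx * 8)) & 0xFF]
--
--     This replaces the per-bit loop with a per-byte lookup, giving
--     roughly an 8x reduction in Python-level iterations for the hot path.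
--     """
--     max_input_bit = max(table) if table else 0
--     input_byte_count = (max_input_bit // 8) + 1
--
--     lut = []
--     for byte_idx in range(input_byte_count):
--         sub = [0] * 256
--         bit_base = byte_idx * 8
--         for byte_val in range(256):
--             contribution = 0
--             for out_bit, in_bit in enumerate(table):
--                 if bit_base <= in_bit < bit_base + 8 and (byte_val >> (in_bit - bit_base)) & 1:
--                     contribution |= 1 << out_bit
--             sub[byte_val] = contribution
--         lut.append(sub)
--     return lut
-- ===== SOURCE B (Python) =====
-- def _build_permutation_lut(table):
--     # One pass over the table builds contrib: in_bit -> OR of output masks.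
--     # Each 256-entry sub-table is then filled by doubling DP: entries
--     # [2**k, 2**(k+1)) are sub[v - 2**k] | single-bit contribution of bit k,
--     # so the table itself is never rescanned per entry.
--     contrib = {}
--     for out_bit, in_bit in enumerate(table):
--         contrib[in_bit] = contrib.get(in_bit, 0) | (1 << out_bit)
--     max_input_bit = max(table) if table else 0
--     lut = []
--     for byte_idx in range((max_input_bit // 8) + 1):
--         base = byte_idx * 8
--         sub = [0] * 256
--         for k in range(8):
--             single = contrib.get(base + k, 0)
--             step = 1 << k
--             for v in range(step, 2 * step):
--                 sub[v] = sub[v - step] | single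
--         lut.append(sub)
--     return lut
-- ===== Notes on version B (the rewrite author's own statement) =====
-- stated objective: faster
-- what changed: B scans the table once into a dict of per-input-bit masks and fills each 256-entry sub-table by subset doubling (sub[v] = sub[v - 2**k] | single-bit entry), so no entry ever rescans the table or tests bits.
import Mathlib
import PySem

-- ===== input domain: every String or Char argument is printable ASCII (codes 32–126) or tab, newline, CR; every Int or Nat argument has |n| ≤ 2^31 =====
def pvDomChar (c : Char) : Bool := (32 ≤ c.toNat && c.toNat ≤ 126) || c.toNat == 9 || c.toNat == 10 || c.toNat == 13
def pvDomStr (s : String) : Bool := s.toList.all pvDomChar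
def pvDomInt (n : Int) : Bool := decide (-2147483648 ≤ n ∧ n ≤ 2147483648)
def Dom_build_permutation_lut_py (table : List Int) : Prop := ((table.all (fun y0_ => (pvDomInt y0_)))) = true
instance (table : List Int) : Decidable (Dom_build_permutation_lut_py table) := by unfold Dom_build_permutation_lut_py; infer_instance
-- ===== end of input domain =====

-- B scans the table once into a dict of per-input-bit masks and fills each 256-entry
-- sub-table by subset doubling (sub[v] = sub[v - 2^k] | single-bit entry), instead of
-- rescanning the table for every entry (objective: faster).


-- ===== PORT A =====
-- Literal port of A.  `sub = [0]*256; for byte_val in range(256): sub[byte_val] = …`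
-- fills every slot exactly once, so it is rendered as a map over range(256).
-- `byte_val >> (in_bit - bit_base)`: under the guard 0 ≤ in_bit - bit_base, so
-- `.toNat` of the shift amount is exact; the enumerate index out_bit is ≥ 0, so its
-- `.toNat` is exact too.  Truthiness of `… & 1` is `≠ 0`.
def build_permutation_lut_py (table : List Int) : List (List Int) :=
  let max_input_bit := match PySem.List.max? table (fun x => x) with | some m => m | none => 0
  let input_byte_count := PySem.Int.floordiv max_input_bit 8 + 1
  (PySem.List.pyRange 0 input_byte_count 1).foldl (fun lut byte_idx =>
    let bit_base := byte_idx * 8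
    let sub := (PySem.List.pyRange 0 256 1).map (fun (byte_val : Int) =>
      (PySem.List.enumerate table 0).foldl (fun contribution p =>
        if bit_base ≤ p.2 ∧ p.2 < bit_base + 8 ∧
            PySem.Int.band (byte_val >>> Int.toNat (p.2 - bit_base)) 1 ≠ 0 then
          PySem.Int.bor contribution ((1 : Int) <<< Int.toNat p.1)
        else contribution) 0)
    lut ++ [sub]) []

-- ===== PORT B =====
-- Port of Source B: one pass over enumerate(table) builds the dict contrib
-- (in_bit -> OR of output masks); each sub-table starts as [0]*256 and is filled by
-- the doubling rounds k = 0..7 (`sub[v] = sub[v - step] | single` for v in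
-- [step, 2*step)).  Both list indices are provably in range (0 ≤ v - step < 256),
-- so `pyGetD`/`set` at those indices are exact for Python's `sub[...]`.
def build_permutation_lut_py_alt (table : List Int) : List (List Int) :=
  let contrib := (PySem.List.enumerate table 0).foldl (fun d p =>
    d.insert p.2 (PySem.Int.bor (d.getD p.2 0) ((1 : Int) <<< Int.toNat p.1)))
    (PySem.Dict.empty : PySem.Dict Int Int)
  let max_input_bit := match PySem.List.max? table (fun x => x) with | some m => m | none => 0
  let input_byte_count := PySem.Int.floordiv max_input_bit 8 + 1
  (PySem.List.pyRange 0 input_byte_count 1).foldl (fun lut byte_idx =>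
    let base := byte_idx * 8
    let sub0 := List.replicate 256 (0 : Int)
    let sub := (PySem.List.pyRange 0 8 1).foldl (fun s k =>
      let single := contrib.getD (base + k) 0
      let step := (1 : Int) <<< Int.toNat k
      (PySem.List.pyRange step (2 * step) 1).foldl (fun s v =>
        s.set (Int.toNat v) (PySem.Int.bor (PySem.List.pyGetD s (v - step) 0) single)) s) sub0
    lut ++ [sub]) []

-- ===== PRECONDITION & SPEC =====
def Spec_build_permutation_lut_py (table : List Int) (out : List (List Int)) : Prop := out = build_permutation_lut_py_alt table
instance (table : List Int) (out : List (List Int)) : Decidable (Spec_build_permutation_lut_py table out) := by unfold Spec_build_permutation_lut_py; infer_instance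

-- ===== CLAIM (what is proved, stated in full; the proofs are below) =====
def Claim_equal_build_permutation_lut_py : Prop := ∀ (table : List Int), Dom_build_permutation_lut_py table → Spec_build_permutation_lut_py table (build_permutation_lut_py table)

-- ===== LEMMAS AND PROOFS =====

-- Nat-level mirror of both programs' accumulation loops: OR the mask 1<<<out_bit of
-- every enumerate pair satisfying q into the accumulator.
def pvNatFold (q : Int × Int → Bool) (l : List (Int × Int)) (a : Nat) : Nat :=
  l.foldl (fun c p => if q p then c ||| (1 <<< Int.toNat p.1) else c) a

-- A's per-entry guard, at byte value v : Nat.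
def pvCondF (base : Int) (v : Nat) (p : Int × Int) : Bool :=
  decide (base ≤ p.2) && decide (p.2 < base + 8) && v.testBit (p.2 - base).toNat

-- the single-key guard of B's dict pass
def pvCondS (key : Int) (p : Int × Int) : Bool := decide (p.2 = key)

-- A's contribution for byte value v, and B's per-input-bit mask, at Nat level.
def pvNatF (table : List Int) (base : Int) (v : Nat) : Nat :=
  pvNatFold (pvCondF base v) (PySem.List.enumerate table 0) 0

def pvNatSingle (table : List Int) (key : Int) : Nat :=
  pvNatFold (pvCondS key) (PySem.List.enumerate table 0) 0

-- Python's `(v >> off) & 1` truthiness is Nat.testBit.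
theorem pv_bit (v off : Nat) : (PySem.Int.band ((v:Int) >>> off) 1 ≠ 0) ↔ v.testBit off := by
  have h : ((v:Int) >>> off) = ((v >>> off : Nat) : Int) := by simp
  rw [h, show (1:Int) = ((1:Nat):Int) from rfl, PySem.Int.band_natCast]
  unfold Nat.testBit
  rw [Nat.and_comm]
  simp
  omega

theorem pvNatFold_acc (q : Int × Int → Bool) (l : List (Int × Int)) (a : Nat) :
    pvNatFold q l a = a ||| pvNatFold q l 0 := by
  induction l generalizing a with
  | nil => simp [pvNatFold]
  | cons h t ih =>
    have e : ∀ b, pvNatFold q (h :: t) b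
        = pvNatFold q t (if q h then b ||| (1 <<< Int.toNat h.1) else b) := fun _ => rfl
    rw [e, e]
    by_cases hq : q h = true
    · rw [if_pos hq, if_pos hq, ih (a ||| (1 <<< Int.toNat h.1)),
        ih ((0:Nat) ||| (1 <<< Int.toNat h.1))]
      simp [Nat.lor_assoc]
    · rw [if_neg hq, if_neg hq]
      exact ih a

theorem pvNatFold_false (q : Int × Int → Bool) (l : List (Int × Int)) (a : Nat)
    (h : ∀ p, q p = false) : pvNatFold q l a = a := by
  induction l generalizing a with
  | nil => rfl
  | cons p t ih =>
    have e : pvNatFold q (p :: t) a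
        = pvNatFold q t (if q p then a ||| (1 <<< Int.toNat p.1) else a) := rfl
    rw [e, h p]
    simp only [Bool.false_eq_true, if_false]
    exact ih a

theorem pvNatFold_split (q q1 q2 : Int × Int → Bool) (l : List (Int × Int))
    (hq : ∀ p, q p = (q1 p || q2 p)) (hd : ∀ p, ¬(q1 p = true ∧ q2 p = true)) :
    pvNatFold q l 0 = pvNatFold q1 l 0 ||| pvNatFold q2 l 0 := by
  induction l with
  | nil => simp [pvNatFold]
  | cons p t ih =>
    have e : ∀ (q' : Int × Int → Bool) (b : Nat), pvNatFold q' (p :: t) b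
        = pvNatFold q' t (if q' p then b ||| (1 <<< Int.toNat p.1) else b) := fun _ _ => rfl
    rw [e, e, e, pvNatFold_acc q t, pvNatFold_acc q1 t, pvNatFold_acc q2 t, ih]
    have hz : ∀ x : Nat, 0 ||| x = x := fun x => by simp
    by_cases hq1 : q1 p = true
    · by_cases hq2 : q2 p = true
      · exact absurd ⟨hq1, hq2⟩ (hd p)
      · rw [hq p, if_pos (by simp [hq1]), if_pos hq1, if_neg hq2]
        simp [Nat.lor_assoc]
    · by_cases hq2 : q2 p = true
      · rw [hq p, if_pos (by simp [hq2]), if_neg hq1, if_pos hq2]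
        rw [hz, hz, ← Nat.lor_assoc,
          Nat.lor_comm (1 <<< Int.toNat p.1) (pvNatFold q1 t 0), Nat.lor_assoc]
      · rw [hq p, if_neg (by simp [hq1, hq2]), if_neg hq1, if_neg hq2]
        simp

theorem pvNatF_zero (table : List Int) (base : Int) : pvNatF table base 0 = 0 := by
  unfold pvNatF
  apply pvNatFold_false
  intro p
  simp [pvCondF]

-- the doubling decomposition: byte value 2^k + w (w < 2^k) selects exactly the
-- entries selected at w plus those with in_bit = base + k
theorem pv_cond_split (base : Int) (k w : Nat) (hk : k < 8) (hw : w < 2^k) (p : Int × Int) :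
    pvCondF base (2^k + w) p = (pvCondS (base + (k:Int)) p || pvCondF base w p) := by
  have hk0 : (0:Int) ≤ (k:Int) := Int.natCast_nonneg k
  unfold pvCondF pvCondS
  by_cases h1 : base ≤ p.2
  · by_cases h2 : p.2 < base + 8
    · have hoff : (((p.2 - base).toNat : Nat) : Int) = p.2 - base := Int.toNat_of_nonneg (by omega)
      rcases lt_trichotomy ((p.2 - base).toNat) k with h | h | h
      · have hne : ¬ p.2 = base + (k:Int) := by omega
        rw [Nat.testBit_two_pow_add_gt h]
        simp [h1, h2, hne]
      · have hw' : w.testBit (p.2 - base).toNat = false := by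
          rw [h]; exact Nat.testBit_lt_two_pow hw
        have heq : p.2 = base + (k:Int) := by omega
        rw [← h, Nat.testBit_two_pow_add_eq, hw']
        simp [heq]
        omega
      · have h2p : 2^k + w < 2^(k+1) := by
          have := hw
          rw [pow_succ]
          omega
        have hle : (2:Nat)^(k+1) ≤ 2^((p.2 - base).toNat) :=
          Nat.pow_le_pow_right (by norm_num) (by omega)
        have hne : ¬ p.2 = base + (k:Int) := by omega
        rw [Nat.testBit_lt_two_pow (lt_of_lt_of_le h2p hle),
          Nat.testBit_lt_two_pow (lt_of_lt_of_le (by omega) hle)]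
        simp [h1, h2, hne]
    · have hne : ¬ p.2 = base + (k:Int) := by omega
      simp [h1, h2, hne]
  · have hne : ¬ p.2 = base + (k:Int) := by omega
    simp [h1, hne]

theorem pvNatF_step (table : List Int) (base : Int) (k w : Nat) (hk : k < 8) (hw : w < 2^k) :
    pvNatF table base (2^k + w) = pvNatSingle table (base + (k:Int)) ||| pvNatF table base w := by
  unfold pvNatF pvNatSingle
  apply pvNatFold_split _ _ _ _ (fun p => pv_cond_split base k w hk hw p)
  intro p hp
  obtain ⟨hs, hf⟩ := hp
  simp only [pvCondS, decide_eq_true_eq] at hs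
  simp only [pvCondF, Bool.and_eq_true, decide_eq_true_eq] at hf
  have hkk : (p.2 - base).toNat = k := by omega
  rw [hkk] at hf
  exact absurd hf.2 (by simp [Nat.testBit_lt_two_pow hw])

-- the Int-level accumulation loop is the cast of the Nat-level one
theorem pv_castFold (q : Int × Int → Bool) (l : List (Int × Int)) (a : Nat) :
    l.foldl (fun c p => if q p then PySem.Int.bor c ((1:Int) <<< Int.toNat p.1) else c) ((a:Nat):Int)
      = ((pvNatFold q l a : Nat) : Int) := by
  induction l generalizing a with
  | nil => rfl
  | cons p t ih =>
    have e : pvNatFold q (p :: t) a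
        = pvNatFold q t (if q p then a ||| (1 <<< Int.toNat p.1) else a) := rfl
    rw [e, List.foldl_cons]
    cases hq : q p
    · simp only [Bool.false_eq_true, if_false]
      exact ih a
    · simp only [if_pos hq]
      have hm : ((1:Int) <<< Int.toNat p.1) = (((1 <<< Int.toNat p.1 : Nat)):Int) := by simp
      rw [hm, PySem.Int.bor_natCast]
      exact ih (a ||| (1 <<< Int.toNat p.1))

-- A's inner fold at byte value ↑v computes pvNatF
theorem pvA_fold (table : List Int) (base : Int) (v : Nat) :
    (PySem.List.enumerate table 0).foldl (fun contribution p =>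
        if base ≤ p.2 ∧ p.2 < base + 8 ∧
            PySem.Int.band (((v:Nat):Int) >>> Int.toNat (p.2 - base)) 1 ≠ 0 then
          PySem.Int.bor contribution ((1 : Int) <<< Int.toNat p.1)
        else contribution) 0
      = ((pvNatF table base v : Nat) : Int) := by
  have hfun : (fun (contribution : Int) (p : Int × Int) =>
      if base ≤ p.2 ∧ p.2 < base + 8 ∧
          PySem.Int.band (((v:Nat):Int) >>> Int.toNat (p.2 - base)) 1 ≠ 0 then
        PySem.Int.bor contribution ((1 : Int) <<< Int.toNat p.1)
      else contribution)
      = (fun c p => if pvCondF base v p then PySem.Int.bor c ((1:Int) <<< Int.toNat p.1) else c) := by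
    funext c p
    apply if_congr _ rfl rfl
    rw [pv_bit v (Int.toNat (p.2 - base))]
    simp [pvCondF, and_assoc]
  rw [hfun, show (0:Int) = ((0:Nat):Int) from rfl, pv_castFold]
  rfl

-- looking up B's dict after the building pass = folding over the matching entries
theorem pv_dict_fold (l : List (Int × Int)) (d : PySem.Dict Int Int) (key : Int) :
    (l.foldl (fun d p =>
        d.insert p.2 (PySem.Int.bor (d.getD p.2 0) ((1 : Int) <<< Int.toNat p.1))) d).getD key 0
      = l.foldl (fun c p => if pvCondS key p then PySem.Int.bor c ((1:Int) <<< Int.toNat p.1) else c)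
          (d.getD key 0) := by
  induction l generalizing d with
  | nil => rfl
  | cons p t ih =>
    simp only [List.foldl_cons]
    rw [ih]
    congr 1
    rw [PySem.Dict.getD_insert]
    by_cases he : p.2 = key
    · simp [pvCondS, he]
    · rw [if_neg (fun h => he h.symm), if_neg (by simp [pvCondS, he])]

theorem pv_single_val (table : List Int) (key : Int) :
    ((PySem.List.enumerate table 0).foldl (fun d p =>
        d.insert p.2 (PySem.Int.bor (d.getD p.2 0) ((1 : Int) <<< Int.toNat p.1)))
        (PySem.Dict.empty : PySem.Dict Int Int)).getD key 0
      = ((pvNatSingle table key : Nat) : Int) := by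
  rw [pv_dict_fold]
  have h0 : (PySem.Dict.empty : PySem.Dict Int Int).getD key 0 = 0 := by simp [pysem]
  rw [h0, show (0:Int) = ((0:Nat):Int) from rfl, pv_castFold]
  rfl

theorem pv_getD_set (s : List Int) (n i : Nat) (x : Int) (hn : n < s.length) (hi : i < s.length) :
    (s.set n x).getD i 0 = if n = i then x else s.getD i 0 := by
  rw [List.getD_eq_getElem _ 0 (by simpa using hi), List.getD_eq_getElem _ 0 hi]
  exact List.getElem_set _

-- the inner DP loop of round k, processing c values starting at t
theorem pv_dp_inner (table : List Int) (base : Int) (k : Nat) (hk : k < 8) (c : Nat) :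
    ∀ (t : Nat) (s : List Int), 2^k ≤ t → t + c ≤ 2^(k+1) → s.length = 256 →
    (∀ i : Nat, i < 256 → s.getD i 0 = if i < t then ((pvNatF table base i : Nat) : Int) else 0) →
    ((PySem.List.pyRange (t:Int) ((t:Int) + (c:Int)) 1).foldl
        (fun s v => s.set (Int.toNat v)
          (PySem.Int.bor (PySem.List.pyGetD s (v - (((2^k : Nat) : Nat):Int)) 0)
            ((pvNatSingle table (base + (k:Int)) : Nat) : Int))) s).length = 256 ∧
    (∀ i : Nat, i < 256 →
      ((PySem.List.pyRange (t:Int) ((t:Int) + (c:Int)) 1).foldl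
        (fun s v => s.set (Int.toNat v)
          (PySem.Int.bor (PySem.List.pyGetD s (v - (((2^k : Nat) : Nat):Int)) 0)
            ((pvNatSingle table (base + (k:Int)) : Nat) : Int))) s).getD i 0
        = if i < t + c then ((pvNatF table base i : Nat) : Int) else 0) := by
  induction c with
  | zero =>
    intro t s ht hle hlen hinv
    rw [show ((t:Int) + ((0:Nat):Int)) = (t:Int) by simp, PySem.List.pyRange_one_eq_nil (le_refl _)]
    simp only [List.foldl_nil]
    refine ⟨hlen, fun i hi => ?_⟩
    rw [hinv i hi, Nat.add_zero]
  | succ c ih =>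
    intro t s ht hle hlen hinv
    have hc : ((t:Int) + ((c+1 : Nat):Int)) = ((t:Int) + (c:Int)) + 1 := by push_cast; ring
    rw [hc, PySem.List.pyRange_one_succ_right (by omega), List.foldl_append]
    obtain ⟨hlen', hinv'⟩ := ih t s ht (by omega) hlen hinv
    simp only [List.foldl_cons, List.foldl_nil]
    have h2 : (2:Nat)^(k+1) = 2^k + 2^k := by rw [pow_succ]; omega
    have h256 : (2:Nat)^(k+1) ≤ 256 := by
      calc (2:Nat)^(k+1) ≤ 2^8 := Nat.pow_le_pow_right (by norm_num) (by omega)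
      _ = 256 := by norm_num
    have hk1 : (1:Nat) ≤ 2^k := Nat.one_le_two_pow
    have htc : t + c < 256 := by omega
    have hwlt : t + c - 2^k < 2^k := by omega
    have hv : ((t:Int) + (c:Int)) = (((t + c : Nat)) : Int) := by push_cast; ring
    have hsub : (((t + c : Nat)) : Int) - (((2^k : Nat)):Int) = (((t + c - 2^k : Nat)) : Int) := by omega
    rw [hv] at hlen' hinv' ⊢
    rw [hsub, Int.toNat_natCast, PySem.List.pyGetD_natCast]
    rw [hinv' (t + c - 2^k) (by omega), if_pos (show t + c - 2^k < t + c by omega)]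
    rw [PySem.Int.bor_natCast]
    have hstep2 : pvNatF table base (t+c)
        = pvNatSingle table (base + (k:Int)) ||| pvNatF table base (t+c-2^k) := by
      have h := pvNatF_step table base k (t+c-2^k) hk hwlt
      rw [show 2^k + (t+c-2^k) = t + c by omega] at h
      exact h
    refine ⟨by rw [List.length_set]; exact hlen', fun i hi => ?_⟩
    rw [pv_getD_set _ _ _ _ (by rw [hlen']; exact htc) (by rw [hlen']; exact hi)]
    by_cases hie : t + c = i
    · rw [if_pos hie, if_pos (by omega), ← hie, hstep2, Nat.lor_comm]
    · rw [if_neg hie, hinv' i hi]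
      by_cases hlt : i < t + c
      · rw [if_pos hlt, if_pos (by omega)]
      · rw [if_neg hlt, if_neg (by omega)]

-- after the first k doubling rounds the prefix [0, 2^k) is final and the rest is 0
set_option maxRecDepth 8192 in
theorem pv_dp_rounds (table : List Int) (base : Int) (dct : PySem.Dict Int Int)
    (hd : ∀ key, dct.getD key 0 = ((pvNatSingle table key : Nat) : Int)) (k : Nat) (hk : k ≤ 8) :
    ((PySem.List.pyRange 0 (k:Int) 1).foldl (fun s kI =>
        let single := dct.getD (base + kI) 0
        let step := (1 : Int) <<< Int.toNat kI
        (PySem.List.pyRange step (2 * step) 1).foldl (fun s v =>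
          s.set (Int.toNat v) (PySem.Int.bor (PySem.List.pyGetD s (v - step) 0) single)) s)
        (List.replicate 256 (0:Int))).length = 256 ∧
    (∀ i : Nat, i < 256 →
      ((PySem.List.pyRange 0 (k:Int) 1).foldl (fun s kI =>
        let single := dct.getD (base + kI) 0
        let step := (1 : Int) <<< Int.toNat kI
        (PySem.List.pyRange step (2 * step) 1).foldl (fun s v =>
          s.set (Int.toNat v) (PySem.Int.bor (PySem.List.pyGetD s (v - step) 0) single)) s)
        (List.replicate 256 (0:Int))).getD i 0
        = if i < 2^k then ((pvNatF table base i : Nat) : Int) else 0) := by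
  revert hk
  induction k with
  | zero =>
    intro _
    rw [show ((0:Nat):Int) = (0:Int) by simp, PySem.List.pyRange_one_eq_nil (le_refl _)]
    simp only [List.foldl_nil]
    refine ⟨List.length_replicate, fun i hi => ?_⟩
    rw [List.getD_eq_getElem _ 0 (by simpa using hi), List.getElem_replicate]
    by_cases h0 : i < 2^0
    · rw [if_pos h0]
      have : i = 0 := by simpa using h0
      rw [this, pvNatF_zero]
      simp
    · rw [if_neg h0]
  | succ k ihk =>
    intro hk
    obtain ⟨hlen, hinv⟩ := ihk (by omega)
    have hkcast : (((k+1:Nat)):Int) = ((k:Nat):Int) + 1 := by push_cast; ring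
    rw [hkcast, PySem.List.pyRange_one_succ_right (Int.natCast_nonneg k), List.foldl_append]
    simp only [List.foldl_cons, List.foldl_nil]
    have hstep1 : (1:Int) <<< Int.toNat ((k:Nat):Int) = (((2^k : Nat)):Int) := by
      rw [Int.toNat_natCast, show ((1:Int) <<< k) = (((1 <<< k : Nat)):Int) by simp,
        Nat.one_shiftLeft]
    have h2step : 2 * (((2^k : Nat)):Int) = (((2^k:Nat)):Int) + (((2^k:Nat)):Int) := by ring
    set P := (PySem.List.pyRange 0 ((k:Nat):Int) 1).foldl (fun s kI =>
        let single := dct.getD (base + kI) 0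
        let step := (1 : Int) <<< Int.toNat kI
        (PySem.List.pyRange step (2 * step) 1).foldl (fun s v =>
          s.set (Int.toNat v) (PySem.Int.bor (PySem.List.pyGetD s (v - step) 0) single)) s)
        (List.replicate 256 (0:Int)) with hP
    simp only [hstep1, h2step, hd]
    have h2 : (2:Nat)^(k+1) = 2^k + 2^k := by rw [pow_succ]; omega
    obtain ⟨hlen2, hinv2⟩ := pv_dp_inner table base k (by omega) (2^k) (2^k) P
      (le_refl _) (by omega) hlen hinv
    refine ⟨hlen2, fun i hi => ?_⟩
    rw [hinv2 i hi]
    by_cases hlt : i < 2^k + 2^k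
    · rw [if_pos hlt, if_pos (by omega)]
    · rw [if_neg hlt, if_neg (by omega)]

-- per byte: B's DP-built sub-table equals A's mapped sub-table
theorem pv_sub_eq (table : List Int) (base : Int) (dct : PySem.Dict Int Int)
    (hd : ∀ key, dct.getD key 0 = ((pvNatSingle table key : Nat) : Int)) :
    ((PySem.List.pyRange 0 8 1).foldl (fun s kI =>
        let single := dct.getD (base + kI) 0
        let step := (1 : Int) <<< Int.toNat kI
        (PySem.List.pyRange step (2 * step) 1).foldl (fun s v =>
          s.set (Int.toNat v) (PySem.Int.bor (PySem.List.pyGetD s (v - step) 0) single)) s)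
        (List.replicate 256 (0:Int)))
      = (PySem.List.pyRange 0 256 1).map (fun (byte_val : Int) =>
          (PySem.List.enumerate table 0).foldl (fun contribution p =>
            if base ≤ p.2 ∧ p.2 < base + 8 ∧
                PySem.Int.band (byte_val >>> Int.toNat (p.2 - base)) 1 ≠ 0 then
              PySem.Int.bor contribution ((1 : Int) <<< Int.toNat p.1)
            else contribution) 0) := by
  rw [show (8:Int) = ((8:Nat):Int) by norm_num,
    show (256:Int) = ((256:Nat):Int) by norm_num]
  obtain ⟨hlen, hinv⟩ := pv_dp_rounds table base dct hd 8 (le_refl _)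
  apply List.ext_getElem
  · rw [hlen, List.length_map, PySem.List.length_pyRange_one]
    decide
  · intro i h1 h2
    have hi : i < 256 := by rw [hlen] at h1; exact h1
    rw [← List.getD_eq_getElem _ 0 h1, hinv i hi,
      if_pos (show i < 2^8 by norm_num; omega), List.getElem_map,
      PySem.List.getElem_pyRange_one, zero_add]
    exact (pvA_fold table base i).symm

-- ===== VERDICT (by name: the statement is the Claim_ definition above) =====
theorem build_permutation_lut_py_spec : Claim_equal_build_permutation_lut_py := by
  intro table _
  unfold Spec_build_permutation_lut_py build_permutation_lut_py build_permutation_lut_py_alt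
  rw [PySem.List.foldl_append_singleton_eq_map, PySem.List.foldl_append_singleton_eq_map]
  simp only [List.nil_append]
  apply List.map_congr_left
  intro byte_idx _
  exact (pv_sub_eq table (byte_idx * 8) _ (pv_single_val table)).symm
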